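-- pv_equiv track=rewrite | github.com/yourjelly/odoo | addons/account/models/test.py | get_account_type_selection
-- ===== SOURCE A (Python) =====
-- ACCOUNT_TYPE_HIERARCHY = {
--     ('equity', "Equity"): [
--         ('equity', "Equity"),
--         ('current_year_earnings', "Current Year Earnings"),
--     ],
--     ('asset', "Assets"): {
--         ('current_assets', "Current Assets"): [
--             ('liquidity', "Bank and Cash"),
--             ('prepayments', "Prepayments"),
--             ('receivable', "Receivable"),
--         ],
--         ('non_current_assets', "Non Current Assets"): [
--             ('fixed_assets', "Fixed Assets"),
--         ],
--     },
--     ('liability', "Liabilities"): [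
--         ('payable', "Payable"),
--         ('current_liabilities', "Current Liabilities"),
--         ('non_current_liabilities', "Non-current Liabilities"),
--         ('credit_card', "Credit Card"),
--     ],
--     ('income', "Income"): [
--         ('revenue', "Revenue"),
--         ('other_income', "Other Income"),
--     ],
--     ('expense', "Expense"): [
--         ('expenses', "Expenses"),
--         ('depreciation', "Depreciation"),
--         ('cost_of_revenue', "Cost of Revenue"),
--     ],
--     ('off_balance', "Off Balance"): [],
-- }
--
-- def get_account_type_selection(level):
--     def iterate(node, node_level, result):
--         if node_level == level:
--             for item in node:
--                 result.append(item)
--         elif isinstance(node, dict):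
--             for sub_node in node.values():
--                 iterate(sub_node, node_level + 1, result)
--
--     result = []
--     iterate(ACCOUNT_TYPE_HIERARCHY, 0, result)
--     return result
-- ===== SOURCE B (Python) =====
-- # The hierarchy is a module constant, so B stores it pre-flattened: one flat
-- # pre-order table mapping each entry to the level at which it is emitted,
-- # and the function is a single filter over that table.
-- FLAT_ACCOUNT_TYPES = [
--     (('equity', "Equity"), 0),
--     (('equity', "Equity"), 1),
--     (('current_year_earnings', "Current Year Earnings"), 1),
--     (('asset', "Assets"), 0),
--     (('current_assets', "Current Assets"), 1),
--     (('liquidity', "Bank and Cash"), 2),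
--     (('prepayments', "Prepayments"), 2),
--     (('receivable', "Receivable"), 2),
--     (('non_current_assets', "Non Current Assets"), 1),
--     (('fixed_assets', "Fixed Assets"), 2),
--     (('liability', "Liabilities"), 0),
--     (('payable', "Payable"), 1),
--     (('current_liabilities', "Current Liabilities"), 1),
--     (('non_current_liabilities', "Non-current Liabilities"), 1),
--     (('credit_card', "Credit Card"), 1),
--     (('income', "Income"), 0),
--     (('revenue', "Revenue"), 1),
--     (('other_income', "Other Income"), 1),
--     (('expense', "Expense"), 0),
--     (('expenses', "Expenses"), 1),
--     (('depreciation', "Depreciation"), 1),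
--     (('cost_of_revenue', "Cost of Revenue"), 1),
--     (('off_balance', "Off Balance"), 0),
-- ]
--
-- def get_account_type_selection(level):
--     return [item for item, depth in FLAT_ACCOUNT_TYPES if depth == level]
-- ===== Notes on version B (the rewrite author's own statement) =====
-- stated objective: simpler
-- what changed: B replaces A's recursive depth-first descent of the nested dict/list hierarchy by a pre-flattened constant table of (entry, level) pairs in pre-order, so the function is a single linear filter with no recursion and no nested-structure traversal.
import Mathlib
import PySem

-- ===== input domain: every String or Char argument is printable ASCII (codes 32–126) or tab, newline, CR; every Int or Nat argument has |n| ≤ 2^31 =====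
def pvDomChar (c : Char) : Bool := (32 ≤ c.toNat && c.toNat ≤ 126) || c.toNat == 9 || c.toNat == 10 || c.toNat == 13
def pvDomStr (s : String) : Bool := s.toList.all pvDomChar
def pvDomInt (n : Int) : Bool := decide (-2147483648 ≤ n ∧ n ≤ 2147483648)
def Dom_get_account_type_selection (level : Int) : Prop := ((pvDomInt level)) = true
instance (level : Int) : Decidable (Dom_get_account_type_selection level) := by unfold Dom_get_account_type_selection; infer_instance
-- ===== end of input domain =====

-- B replaces the recursive descent of the nested constant by a single filter over a pre-flattened (entry, level) table (objective: alternative decomposition).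

-- ===== PORT A =====
-- The nested dict/list constant, encoded as a mutual inductive (no nested inductives allowed):
-- a node is either a list of (str,str) pairs or a dict from (str,str) keys to sub-nodes.
mutual
inductive PNode where
  | lst : PKeys → PNode
  | dct : PDict → PNode
  deriving DecidableEq, Repr
inductive PKeys where
  | nil : PKeys
  | cons : String → String → PKeys → PKeys
  deriving DecidableEq, Repr
inductive PDict where
  | dnil : PDict
  | dcons : String → String → PNode → PDict → PDict
  deriving DecidableEq, Repr
end

def PKeys.toList : PKeys → List (String × String)
  | .nil => []
  | .cons a b r => (a, b) :: r.toList

def PDict.keys : PDict → List (String × String)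
  | .dnil => []
  | .dcons a b _ r => (a, b) :: r.keys

-- 'for item in node': a dict iterates over its keys, a list over its elements
def PNode.items : PNode → List (String × String)
  | .lst k => k.toList
  | .dct d => d.keys

def ACCOUNT_TYPE_HIERARCHY : PDict :=
  .dcons "equity" "Equity"
    (.lst (.cons "equity" "Equity" (.cons "current_year_earnings" "Current Year Earnings" .nil)))
  (.dcons "asset" "Assets"
    (.dct (.dcons "current_assets" "Current Assets"
            (.lst (.cons "liquidity" "Bank and Cash" (.cons "prepayments" "Prepayments"
                  (.cons "receivable" "Receivable" .nil))))
          (.dcons "non_current_assets" "Non Current Assets"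
            (.lst (.cons "fixed_assets" "Fixed Assets" .nil))
          .dnil)))
  (.dcons "liability" "Liabilities"
    (.lst (.cons "payable" "Payable" (.cons "current_liabilities" "Current Liabilities"
          (.cons "non_current_liabilities" "Non-current Liabilities"
          (.cons "credit_card" "Credit Card" .nil)))))
  (.dcons "income" "Income"
    (.lst (.cons "revenue" "Revenue" (.cons "other_income" "Other Income" .nil)))
  (.dcons "expense" "Expense"
    (.lst (.cons "expenses" "Expenses" (.cons "depreciation" "Depreciation"
          (.cons "cost_of_revenue" "Cost of Revenue" .nil))))
  (.dcons "off_balance" "Off Balance" (.lst .nil)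
  .dnil)))))

-- A's inner 'iterate': append-to-result recursion over nodes / dict values, in order.
mutual
def iterateA (level : Int) : PNode → Int → List (String × String) → List (String × String)
  | node, node_level, result =>
    if node_level = level then result ++ node.items
    else match node with
      | .dct d => iterateDictA level d node_level result
      | .lst _ => result
def iterateDictA (level : Int) : PDict → Int → List (String × String) → List (String × String)
  | .dnil, _, result => result
  | .dcons _ _ sub rest, node_level, result =>
      iterateDictA level rest node_level (iterateA level sub (node_level + 1) result)
end

def get_account_type_selection (level : Int) : List (String × String) :=
  iterateA level (.dct ACCOUNT_TYPE_HIERARCHY) 0 []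

-- ===== PORT B =====
-- Source B's pre-flattened pre-order table: each account-type entry with the level at which it is emitted.
def FLAT_ACCOUNT_TYPES : List ((String × String) × Int) :=
  [ (("equity", "Equity"), 0),
    (("equity", "Equity"), 1),
    (("current_year_earnings", "Current Year Earnings"), 1),
    (("asset", "Assets"), 0),
    (("current_assets", "Current Assets"), 1),
    (("liquidity", "Bank and Cash"), 2),
    (("prepayments", "Prepayments"), 2),
    (("receivable", "Receivable"), 2),
    (("non_current_assets", "Non Current Assets"), 1),
    (("fixed_assets", "Fixed Assets"), 2),
    (("liability", "Liabilities"), 0),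
    (("payable", "Payable"), 1),
    (("current_liabilities", "Current Liabilities"), 1),
    (("non_current_liabilities", "Non-current Liabilities"), 1),
    (("credit_card", "Credit Card"), 1),
    (("income", "Income"), 0),
    (("revenue", "Revenue"), 1),
    (("other_income", "Other Income"), 1),
    (("expense", "Expense"), 0),
    (("expenses", "Expenses"), 1),
    (("depreciation", "Depreciation"), 1),
    (("cost_of_revenue", "Cost of Revenue"), 1),
    (("off_balance", "Off Balance"), 0) ]

-- '[item for item, depth in FLAT_ACCOUNT_TYPES if depth == level]'
def get_account_type_selection_alt (level : Int) : List (String × String) :=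
  (FLAT_ACCOUNT_TYPES.filter (fun p => p.2 == level)).map (fun p => p.1)

-- ===== PRECONDITION & SPEC =====
def Spec_get_account_type_selection (level : Int) (out : List (String × String)) : Prop := out = get_account_type_selection_alt level
instance (level : Int) (out : List (String × String)) : Decidable (Spec_get_account_type_selection level out) := by unfold Spec_get_account_type_selection; infer_instance

-- ===== CLAIM (what is proved, stated in full; the proofs are below) =====
def Claim_equal_get_account_type_selection : Prop := ∀ (level : Int), Dom_get_account_type_selection level → Spec_get_account_type_selection level (get_account_type_selection level)

-- ===== LEMMAS AND PROOFS =====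

-- outside 0..2 the recursion of A produces nothing
theorem iterateA_out (level : Int) (h0 : ¬((0:Int) = level)) (h1 : ¬((1:Int) = level))
    (h2 : ¬((2:Int) = level)) : get_account_type_selection level = [] := by
  simp [get_account_type_selection, ACCOUNT_TYPE_HIERARCHY, iterateA, iterateDictA,
        h0, h1, h2, show (0:Int)+1 = 1 from rfl, show (1:Int)+1 = 2 from rfl]

-- outside 0..2 the flat table's filter keeps nothing
theorem alt_out (level : Int) (h0 : ¬((0:Int) = level)) (h1 : ¬((1:Int) = level))
    (h2 : ¬((2:Int) = level)) : get_account_type_selection_alt level = [] := by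
  have e0 : ((0:Int) == level) = false := by simpa using h0
  have e1 : ((1:Int) == level) = false := by simpa using h1
  have e2 : ((2:Int) == level) = false := by simpa using h2
  simp [get_account_type_selection_alt, FLAT_ACCOUNT_TYPES, List.filter, e0, e1, e2]

-- ===== VERDICT (by name: the statement is the Claim_ definition above) =====
theorem get_account_type_selection_spec : Claim_equal_get_account_type_selection := by
  intro level _
  unfold Spec_get_account_type_selection
  by_cases h0 : level = 0
  · subst h0; decide
  by_cases h1 : level = 1
  · subst h1; decide
  by_cases h2 : level = 2
  · subst h2; decide
  rw [iterateA_out level (by omega) (by omega) (by omega),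
      alt_out level (by omega) (by omega) (by omega)]
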